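-- pv_equiv track=rewrite | github.com/Echohjy/userStudy2020 | fixedSurface.py | calNeighborsNum
-- ===== SOURCE A (Python) =====
-- def calNeighborsNum(neighborsInOrderOfCells):
--     toLoop = []
--     neighborsNum = []
--     maxNum = 0
--     for i in range(len(neighborsInOrderOfCells)):
--         num = len(neighborsInOrderOfCells[i])
--         if (num > maxNum):
--             maxNum = num
--         neighborsNum.append(num)
--     while (maxNum > 0):
--         for i in range(len(neighborsNum)):
--             if (neighborsNum[i] == maxNum):
--                 toLoop.append(i)
--         maxNum -= 1
--     toLoop.reverse()
--     return toLoop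
-- ===== SOURCE B (Python) =====
-- def calNeighborsNum(neighborsInOrderOfCells):
--     buckets = {}
--     maxNum = 0
--     for idx, nbrs in enumerate(neighborsInOrderOfCells):
--         c = len(nbrs)
--         if c > maxNum:
--             maxNum = c
--         buckets.setdefault(c, []).append(idx)
--     out = []
--     for c in range(1, maxNum + 1):
--         out.extend(reversed(buckets.get(c, [])))
--     return out
-- ===== Notes on version B (the rewrite author's own statement) =====
-- stated objective: faster
-- what changed: Single bucketing pass (count -> list of indices) followed by one sweep over counts 1..max, instead of re-scanning the whole counts list once per count value.
import Mathlib
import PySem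

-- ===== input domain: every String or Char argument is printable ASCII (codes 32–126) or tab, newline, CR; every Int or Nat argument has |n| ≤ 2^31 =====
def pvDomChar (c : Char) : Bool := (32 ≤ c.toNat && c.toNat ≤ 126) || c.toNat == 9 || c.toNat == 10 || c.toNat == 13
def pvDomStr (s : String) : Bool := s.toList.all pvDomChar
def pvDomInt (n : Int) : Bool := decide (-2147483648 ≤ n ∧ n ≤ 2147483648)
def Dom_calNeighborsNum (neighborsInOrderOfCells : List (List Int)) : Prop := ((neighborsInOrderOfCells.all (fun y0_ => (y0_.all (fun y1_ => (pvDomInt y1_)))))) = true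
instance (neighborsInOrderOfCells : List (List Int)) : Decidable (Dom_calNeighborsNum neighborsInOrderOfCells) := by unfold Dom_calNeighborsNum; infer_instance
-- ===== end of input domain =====

-- B replaces A's repeated full scans of the counts list (one per count value, max..1)
-- by a single bucketing pass (count -> indices) plus one sweep over counts 1..max.

-- ===== PORT A =====
-- inner 'for i in range(len(neighborsNum)): if neighborsNum[i] == maxNum: toLoop.append(i)'
def pvA_inner (counts : List Int) (m : Int) (acc : List Int) : List Int :=
  (PySem.List.pyRange 0 (counts.length : Int) 1).foldl
    (fun a i => if PySem.List.pyGetD counts i 0 == m then a ++ [i] else a) acc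

-- 'while (maxNum > 0): … maxNum -= 1'
def pvA_while (counts : List Int) (m : Int) (acc : List Int) : List Int :=
  if 0 < m then pvA_while counts (m - 1) (pvA_inner counts m acc) else acc
termination_by m.toNat
decreasing_by omega

def calNeighborsNum (neighborsInOrderOfCells : List (List Int)) : List Int :=
  let st := neighborsInOrderOfCells.foldl
    (fun (s : Int × List Int) nbrs =>
      let num : Int := nbrs.length
      (if num > s.1 then num else s.1, s.2 ++ [num])) (0, [])
  (pvA_while st.2 st.1 []).reverse

-- ===== PORT B =====
def calNeighborsNum_alt (neighborsInOrderOfCells : List (List Int)) : List Int :=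
  let st := (PySem.List.enumerate neighborsInOrderOfCells 0).foldl
    (fun (s : Int × PySem.Dict Int (List Int)) p =>
      let c : Int := p.2.length
      (if c > s.1 then c else s.1, s.2.modify c [] (· ++ [p.1]))) (0, PySem.Dict.empty)
  (PySem.List.pyRange 1 (st.1 + 1) 1).foldl
    (fun out c => out ++ (st.2.getD c []).reverse) []

-- ===== PRECONDITION & SPEC =====
def Spec_calNeighborsNum (neighborsInOrderOfCells : List (List Int)) (out : List Int) : Prop := out = calNeighborsNum_alt neighborsInOrderOfCells
instance (neighborsInOrderOfCells : List (List Int)) (out : List Int) : Decidable (Spec_calNeighborsNum neighborsInOrderOfCells out) := by unfold Spec_calNeighborsNum; infer_instance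

-- ===== CLAIM (what is proved, stated in full; the proofs are below) =====
def Claim_equal_calNeighborsNum : Prop := ∀ (neighborsInOrderOfCells : List (List Int)), Dom_calNeighborsNum neighborsInOrderOfCells → Spec_calNeighborsNum neighborsInOrderOfCells (calNeighborsNum neighborsInOrderOfCells)

-- ===== LEMMAS AND PROOFS =====


-- the indices (ascending) whose cell has exactly c neighbors
def pvSel (ns : List (List Int)) (c : Int) : List Int :=
  (PySem.List.pyRange 0 (ns.length : Int) 1).filter
    (fun j => ((PySem.List.pyGetD ns j ([] : List Int)).length : Int) == c)

def pvMaxf (m : Int) (l : List Int) : Int := if (l.length : Int) > m then (l.length : Int) else m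

-- A's inner for-loop appends exactly the indices with count m
lemma pvA_inner_eq (counts : List Int) (m : Int) (acc : List Int) :
    pvA_inner counts m acc =
      acc ++ (PySem.List.pyRange 0 (counts.length : Int) 1).filter
        (fun i => PySem.List.pyGetD counts i 0 == m) := by
  unfold pvA_inner
  exact PySem.List.foldl_append_if_eq_filter _ _ _

-- A's while-loop is a flatMap over the countdown range m..1
lemma pvA_while_eq (counts : List Int) (m : Int) (acc : List Int) :
    pvA_while counts m acc =
      acc ++ (PySem.List.pyRange m 0 (-1)).flatMap
        (fun c => (PySem.List.pyRange 0 (counts.length : Int) 1).filter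
          (fun i => PySem.List.pyGetD counts i 0 == c)) := by
  induction m, acc using pvA_while.induct (counts := counts) with
  | case1 m acc h ih =>
    rw [pvA_while, if_pos h, ih, pvA_inner_eq,
        PySem.List.pyRange_neg_one_cons h, List.flatMap_cons, List.append_assoc]
  | case2 m acc h =>
    rw [pvA_while, if_neg h, PySem.List.pyRange_neg_one_eq_nil (by omega),
        List.flatMap_nil, List.append_nil]

-- for counts = lengths of ns, the filtered range is pvSel
lemma pvFilter_eq (ns : List (List Int)) (c : Int) :
    (PySem.List.pyRange 0 ((ns.map (fun l => (l.length : Int))).length : Int) 1).filter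
      (fun i => PySem.List.pyGetD (ns.map (fun l => (l.length : Int))) i 0 == c) = pvSel ns c := by
  unfold pvSel
  rw [List.length_map]
  refine List.filter_congr (fun i hi => ?_)
  rw [PySem.List.mem_pyRange_one] at hi
  have h0 : PySem.List.pyGetD (ns.map (fun l => (l.length : Int))) i 0
      = ((PySem.List.pyGetD ns i ([] : List Int)).length : Int) := by
    rw [PySem.List.pyGetD_eq_getElem _ _ (by omega) (by simpa using hi.2),
        PySem.List.pyGetD_eq_getElem _ _ (by omega) (by exact_mod_cast hi.2)]
    simp
  rw [h0]

-- A's first loop (pair state) splits into max and the counts list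
lemma pvA_fold_eq (ns : List (List Int)) :
    ns.foldl (fun (s : Int × List Int) nbrs =>
        (if (nbrs.length : Int) > s.1 then (nbrs.length : Int) else s.1,
         s.2 ++ [(nbrs.length : Int)])) (0, []) =
      (ns.foldl pvMaxf 0, ns.map (fun l => (l.length : Int))) := by
  rw [PySem.List.foldl_prod_mk
        (f := fun a (nbrs : List Int) => if (nbrs.length : Int) > a then (nbrs.length : Int) else a)
        (g := fun b (nbrs : List Int) => b ++ [(nbrs.length : Int)]),
      PySem.List.foldl_append_singleton_eq_map]
  rfl

-- B's bucketing loop (pair state) splits into max and the dict fold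
lemma pvB_fold_eq (ns : List (List Int)) :
    (PySem.List.enumerate ns 0).foldl
      (fun (s : Int × PySem.Dict Int (List Int)) p =>
        (if ((p.2.length : Int)) > s.1 then ((p.2.length : Int)) else s.1,
         s.2.modify ((p.2.length : Int)) [] (· ++ [p.1]))) (0, PySem.Dict.empty) =
      (ns.foldl pvMaxf 0,
       (PySem.List.enumerate ns 0).foldl
         (fun d p => d.modify ((p.2.length : Int)) [] (· ++ [p.1])) PySem.Dict.empty) := by
  rw [PySem.List.foldl_prod_mk
        (f := fun a (p : Int × List Int) => if ((p.2.length : Int)) > a then ((p.2.length : Int)) else a)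
        (g := fun (d : PySem.Dict Int (List Int)) (p : Int × List Int) =>
          d.modify ((p.2.length : Int)) [] (· ++ [p.1]))]
  have : (PySem.List.enumerate ns 0).foldl
      (fun a (p : Int × List Int) => if ((p.2.length : Int)) > a then ((p.2.length : Int)) else a) 0
      = ns.foldl pvMaxf 0 := by
    have h := List.foldl_map (f := fun (p : Int × List Int) => p.2) (g := pvMaxf)
      (l := PySem.List.enumerate ns 0) (init := (0 : Int))
    rw [PySem.List.map_snd_enumerate] at h
    exact h.symm
  rw [this]

-- the dict bucket for key c is exactly pvSel ns c
lemma pvBucket_eq (ns : List (List Int)) (c : Int) :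
    ((PySem.List.enumerate ns 0).foldl
      (fun (d : PySem.Dict Int (List Int)) p => d.modify ((p.2.length : Int)) [] (· ++ [p.1]))
      PySem.Dict.empty).getD c [] = pvSel ns c := by
  have h := List.foldl_map (f := fun (p : Int × List Int) => (((p.2.length : Int)), p.1))
    (g := fun (d : PySem.Dict Int (List Int)) q => d.modify q.1 [] (· ++ [q.2]))
    (l := PySem.List.enumerate ns 0) (init := (PySem.Dict.empty : PySem.Dict Int (List Int)))
  rw [← h, PySem.Dict.getD_foldl_modify_append]
  rw [PySem.List.enumerate_eq_map_pyRange (d := ([] : List Int))]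
  simp only [List.map_map, List.filter_map, List.map_map]
  unfold pvSel
  simp [Function.comp_def, PySem.Dict.getD_empty]

theorem calNeighborsNum_spec : Claim_equal_calNeighborsNum := by
  intro ns _
  unfold Spec_calNeighborsNum calNeighborsNum calNeighborsNum_alt
  simp only []
  rw [pvA_fold_eq, pvB_fold_eq]
  rw [pvA_while_eq, List.nil_append]
  rw [PySem.List.foldl_append_eq_flatMap, List.nil_append]
  have hs : (fun c => (PySem.List.pyRange 0 (((ns.map (fun l => (l.length : Int))).length : Int)) 1).filter
      (fun i => PySem.List.pyGetD (ns.map (fun l => (l.length : Int))) i 0 == c))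
      = pvSel ns := funext fun c => pvFilter_eq ns c
  have hb : (fun c => (((PySem.List.enumerate ns 0).foldl
      (fun (d : PySem.Dict Int (List Int)) p => d.modify ((p.2.length : Int)) [] (· ++ [p.1]))
      PySem.Dict.empty).getD c []).reverse) = fun c => (pvSel ns c).reverse :=
    funext fun c => by rw [pvBucket_eq]
  rw [hs, hb, List.reverse_flatMap]
  have hr : (PySem.List.pyRange (ns.foldl pvMaxf 0) 0 (-1)).reverse
      = PySem.List.pyRange 1 (ns.foldl pvMaxf 0 + 1) 1 := by
    rw [PySem.List.pyRange_neg_one_eq_reverse, List.reverse_reverse]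
    norm_num
  rw [hr]
  simp [Function.comp_def]
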